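-- pv_equiv track=rewrite | github.com/SillyLlam/SRM-AI | orb_ai.py | _get_general_procedure
-- ===== SOURCE A (Python) =====
-- from typing import Dict, Any, Optional, List, Tuple
--
-- def _get_general_procedure(
--
--     entities: List[str],
--     context: Dict[str, Any]
-- ) -> Tuple[List[str], Optional[str]]:
--     """Get steps for general procedures."""
--     steps = []
--     additional_info = None
--
--     # Handle common procedures
--     if any('library' in entity.lower() for entity in entities):
--         steps = [
--             "Visit the library with your student ID",
--             "Register at the front desk",
--             "Get your library card",
--             "Follow borrowing guidelines",
--             "Return books on time"
--         ]
--         additional_info = "Library timings: 8:00 AM to 8:00 PM"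
--
--     elif any('hostel' in entity.lower() for entity in entities):
--         steps = [
--             "Submit hostel application",
--             "Pay hostel fees",
--             "Complete room allocation process",
--             "Collect room keys",
--             "Complete check-in formalities"
--         ]
--         additional_info = "Contact hostel office for more details"
--
--     return steps, additional_info
-- ===== SOURCE B (Python) =====
-- from typing import Dict, Any, Optional, List, Tuple
--
-- _RESULTS: Tuple[Tuple[List[str], Optional[str]], ...] = (
--     (["Visit the library with your student ID",
--       "Register at the front desk",
--       "Get your library card",
--       "Follow borrowing guidelines",
--       "Return books on time"],
--      "Library timings: 8:00 AM to 8:00 PM"),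
--     (["Submit hostel application",
--       "Pay hostel fees",
--       "Complete room allocation process",
--       "Collect room keys",
--       "Complete check-in formalities"],
--      "Contact hostel office for more details"),
--     ([], None),
-- )
--
-- def _get_general_procedure(entities: List[str], context: Dict[str, Any]) -> Tuple[List[str], Optional[str]]:
--     """Single pass over entities: keep the best (minimal) procedure rank, then index the result table."""
--     rank = 2
--     for e in entities:
--         low = e.lower()
--         r = 0 if 'library' in low else 1 if 'hostel' in low else 2
--         if r < rank:
--             rank = r
--         if rank == 0:
--             break
--     return _RESULTS[rank]
-- ===== Notes on version B (the rewrite author's own statement) =====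
-- stated objective: alternative
-- what changed: Replaced A's staged per-keyword scans (any 'library', elif any 'hostel') with a single pass over the entities that maintains a minimal priority rank (0=library, 1=hostel, 2=none) with early exit, then indexes a result table by that rank.
import Mathlib
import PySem

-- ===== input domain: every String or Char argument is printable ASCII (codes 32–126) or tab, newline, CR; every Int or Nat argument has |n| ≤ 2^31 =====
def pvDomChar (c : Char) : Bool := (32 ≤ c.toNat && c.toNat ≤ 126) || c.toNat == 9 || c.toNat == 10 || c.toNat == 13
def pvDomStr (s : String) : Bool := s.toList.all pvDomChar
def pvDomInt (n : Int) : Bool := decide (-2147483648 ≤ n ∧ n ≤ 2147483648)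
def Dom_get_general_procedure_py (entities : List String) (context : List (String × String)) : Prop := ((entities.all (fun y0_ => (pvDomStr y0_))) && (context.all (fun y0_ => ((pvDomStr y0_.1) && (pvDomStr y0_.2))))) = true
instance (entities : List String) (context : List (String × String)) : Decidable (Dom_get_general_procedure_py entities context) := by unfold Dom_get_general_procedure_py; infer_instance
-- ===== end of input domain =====

-- B replaces A's staged per-keyword any-scans with a single pass maintaining a minimal priority rank (with early exit), then indexes a result table; objective: alternative decomposition.


-- ===== PORT A =====
def get_general_procedure_py (entities : List String) (context : List (String × String)) : List String × Option String :=
  if entities.any (fun e => PySem.Str.isIn "library" (PySem.Str.lower e)) then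
    (["Visit the library with your student ID",
      "Register at the front desk",
      "Get your library card",
      "Follow borrowing guidelines",
      "Return books on time"],
     some "Library timings: 8:00 AM to 8:00 PM")
  else if entities.any (fun e => PySem.Str.isIn "hostel" (PySem.Str.lower e)) then
    (["Submit hostel application",
      "Pay hostel fees",
      "Complete room allocation process",
      "Collect room keys",
      "Complete check-in formalities"],
     some "Contact hostel office for more details")
  else ([], none)

-- ===== PORT B =====
-- the _RESULTS table, indexed by rank 0/1/2
def pvResults : List (List String × Option String) :=
  [(["Visit the library with your student ID",
     "Register at the front desk",
     "Get your library card",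
     "Follow borrowing guidelines",
     "Return books on time"],
    some "Library timings: 8:00 AM to 8:00 PM"),
   (["Submit hostel application",
     "Pay hostel fees",
     "Complete room allocation process",
     "Collect room keys",
     "Complete check-in formalities"],
    some "Contact hostel office for more details"),
   ([], none)]

-- the single-pass loop of B: minimal rank so far, early exit at 0
def pvRankLoop (entities : List String) (rank : Nat) : Nat :=
  match entities with
  | [] => rank
  | e :: rest =>
    let low := PySem.Str.lower e
    let r : Nat := if PySem.Str.isIn "library" low then 0 else if PySem.Str.isIn "hostel" low then 1 else 2
    let rank' := if r < rank then r else rank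
    if rank' = 0 then 0 else pvRankLoop rest rank'

def get_general_procedure_py_alt (entities : List String) (context : List (String × String)) : List String × Option String :=
  pvResults.getD (pvRankLoop entities 2) ([], none)

-- ===== PRECONDITION & SPEC =====
def Spec_get_general_procedure_py (entities : List String) (context : List (String × String)) (out : List String × Option String) : Prop := out = get_general_procedure_py_alt entities context
instance (entities : List String) (context : List (String × String)) (out : List String × Option String) : Decidable (Spec_get_general_procedure_py entities context out) := by unfold Spec_get_general_procedure_py; infer_instance

-- ===== CLAIM (what is proved, stated in full; the proofs are below) =====
def Claim_equal_get_general_procedure_py : Prop := ∀ (entities : List String) (context : List (String × String)), Dom_get_general_procedure_py entities context → Spec_get_general_procedure_py entities context (get_general_procedure_py entities context)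

-- ===== LEMMAS AND PROOFS =====
-- rank of the whole list, as A sees it
def pvListRank (entities : List String) : Nat :=
  if entities.any (fun e => PySem.Str.isIn "library" (PySem.Str.lower e)) then 0
  else if entities.any (fun e => PySem.Str.isIn "hostel" (PySem.Str.lower e)) then 1
  else 2

theorem pvRankLoop_eq (entities : List String) (acc : Nat) (hacc : acc ≤ 2) :
    pvRankLoop entities acc = min acc (pvListRank entities) := by
  induction entities generalizing acc with
  | nil => simp [pvRankLoop, pvListRank]; omega
  | cons e rest ih =>
    by_cases h1 : PySem.Str.isIn "library" (PySem.Str.lower e) = true <;>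
    by_cases h2 : PySem.Str.isIn "hostel" (PySem.Str.lower e) = true <;>
    simp only [pvRankLoop, pvListRank, List.any_cons, h1, h2, if_true,
      Bool.true_or, Bool.false_or, Bool.false_eq_true, if_false] <;>
    split_ifs <;>
    (try rw [ih _ (by omega)]) <;>
    (try (unfold pvListRank; split_ifs)) <;> first | omega | (exfalso; assumption)

-- ===== VERDICT (by name: the statement is the Claim_ definition above) =====
theorem get_general_procedure_py_spec : Claim_equal_get_general_procedure_py := by
  intro entities context _
  unfold Spec_get_general_procedure_py get_general_procedure_py get_general_procedure_py_alt
  rw [pvRankLoop_eq _ _ (by omega)]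
  unfold pvListRank
  cases h1 : entities.any (fun e => PySem.Str.isIn "library" (PySem.Str.lower e)) <;>
  cases h2 : entities.any (fun e => PySem.Str.isIn "hostel" (PySem.Str.lower e)) <;>
  simp [pvResults]
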